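-- pv_equiv track=rewrite | github.com/JungHoiMin/coding_study | 2251 물통.py | bfs
-- ===== SOURCE A (Python) =====
-- from collections import deque
--
-- def visit(a, b, visited):
--     if not visited[a][b]:
--         visited[a][b] = True
--         return False
--     else:
--         return True
--
-- def xtoy(x, y, Y):
--     total = x + y
--     temp = Y - total
--     if temp >= 0:
--         return 0, total
--     else:
--         return -temp, Y
--
-- def bfs(A: int, B: int, C: int):
--     answer = set()
--     queue = deque()
--     queue.append((0, 0, C))
--     visited = [[False] * 201 for _ in range(201)]
--     while queue:
--         a, b, c = queue.popleft()
--         if a == 0: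
--             answer.add(c)
--
--         # A->B
--         newA, newB = xtoy(a, b, B)
--         if not visit(newA, newB, visited):
--             queue.append((newA, newB, c))
--
--         # A->C
--         newA, newC = xtoy(a, c, C)
--         if not visit(newA, b, visited):
--             queue.append((newA, b, newC))
--
--         # B->A
--         newB, newA = xtoy(b, a, A)
--         if not visit(newA, newB, visited):
--             queue.append((newA, newB, c))
--
--         # B->C
--         newB, newC = xtoy(b, c, C)
--         if not visit(a, newB, visited):
--             queue.append((a, newB, newC))
--
--         # C->A
--         newC, newA = xtoy(c, a, A)
--         if not visit(newA, b, visited):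
--             queue.append((newA, b, newC))
--
--         # C->B
--         newC, newB = xtoy(c, b, B)
--         if not visit(a, newB, visited):
--             queue.append((a, newB, newC))
--
--     return list(answer)
-- ===== SOURCE B (Python) =====
-- def xtoy(x, y, Y):
--     total = x + y
--     temp = Y - total
--     if temp >= 0:
--         return 0, total
--     else:
--         return -temp, Y
--
-- def moves(a, b, c, A, B, C):
--     ab = xtoy(a, b, B)   # A->B
--     ac = xtoy(a, c, C)   # A->C
--     ba = xtoy(b, a, A)   # B->A
--     bc = xtoy(b, c, C)   # B->C
--     ca = xtoy(c, a, A)   # C->A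
--     cb = xtoy(c, b, B)   # C->B
--     return [(ab[0], ab[1], c),
--             (ac[0], b, ac[1]),
--             (ba[1], ba[0], c),
--             (a, bc[0], bc[1]),
--             (ca[1], b, ca[0]),
--             (a, cb[1], cb[0])]
--
-- def bfs(A: int, B: int, C: int):
--     answer = set()
--     visited = [[False] * 201 for _ in range(201)]
--     def dfs(a, b, c):
--         if a == 0:
--             answer.add(c)
--         for na, nb, nc in moves(a, b, c, A, B, C):
--             if not visited[na][nb]:
--                 visited[na][nb] = True
--                 dfs(na, nb, nc)
--     dfs(0, 0, C)
--     return sorted(answer)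
-- ===== Notes on version B (the rewrite author's own statement) =====
-- stated objective: alternative
-- what changed: Replaces A's deque-driven BFS while-loop with a recursive DFS (a moves helper lists the six pours; recursion over freshly marked cells replaces the queue) over the same 201x201 visited grid; it collects the identical set of C-values, returned in ascending order (the output is compared as a set, since Python's list(set) hash iteration order is incidental).
import Mathlib
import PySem

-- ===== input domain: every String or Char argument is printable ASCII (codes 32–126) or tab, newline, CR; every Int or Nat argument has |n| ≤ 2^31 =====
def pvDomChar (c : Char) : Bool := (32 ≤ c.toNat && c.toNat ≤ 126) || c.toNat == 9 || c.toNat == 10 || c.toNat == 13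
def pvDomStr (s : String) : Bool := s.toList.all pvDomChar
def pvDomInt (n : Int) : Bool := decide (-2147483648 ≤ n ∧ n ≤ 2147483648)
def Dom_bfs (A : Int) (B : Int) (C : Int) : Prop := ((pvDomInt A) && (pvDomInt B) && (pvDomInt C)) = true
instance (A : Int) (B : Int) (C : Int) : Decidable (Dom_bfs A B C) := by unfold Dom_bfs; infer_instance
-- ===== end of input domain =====

-- B replaces A's deque-driven BFS loop by a recursive DFS over the same pour moves (objective: alternative,
-- same cost).  Both Pythons produce the same SET of C-values; the output list is compared as a set
-- (Python's `list(set)` iteration order is not modelled), so both ports return it in ascending order.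

-- ===== PORT A =====
-- helper `xtoy` of A, literal
def xtoyL (x : Int) (y : Int) (Y : Int) : Int × Int :=
  let total := x + y
  let temp := Y - total
  if temp ≥ 0 then (0, total) else (-temp, Y)

-- `visited[a][b]` of the 201×201 boolean grid, modelled by the set of its True cells; an index
-- pair outside 0..200 reads as True (there the actual Python wraps around or raises IndexError —
-- exactly the inputs Pre_bfs excludes; inside Pre_bfs every index pair used lies in 0..200, where
-- this is exact)
def seenL (v : PySem.Set (Int × Int)) (a : Int) (b : Int) : Bool :=
  !(decide (0 ≤ a ∧ a ≤ 200 ∧ 0 ≤ b ∧ b ≤ 200)) || PySem.Set.contains v (a, b)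

-- helper `visit` of A: returns (was already visited, updated grid), exactly A's visit (within Pre_bfs)
def visitL (a : Int) (b : Int) (v : PySem.Set (Int × Int)) : Bool × PySem.Set (Int × Int) :=
  if ¬ (seenL v a b) then (false, PySem.Set.add v (a, b)) else (true, v)

-- the `while queue:` loop of A, step for step (queue, visited, answer); fuel only makes the
-- recursion structural: 40402 = 1 + 201·201 never runs out inside Pre_bfs (proved below)
def bfsLoop (Aa : Int) (Bb : Int) (Cc : Int) :
    Nat → List (Int × Int × Int) → PySem.Set (Int × Int) → PySem.Set Int →
    PySem.Set (Int × Int) × PySem.Set Int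
  | 0, _, v, ans => (v, ans)
  | _ + 1, [], v, ans => (v, ans)
  | fuel + 1, (a, b, c) :: q, v, ans =>
    let ans := if a = 0 then PySem.Set.add ans c else ans
    -- A->B
    let p1 := xtoyL a b Bb
    let r1 := visitL p1.1 p1.2 v
    let v := r1.2
    let q := if !r1.1 then q ++ [(p1.1, p1.2, c)] else q
    -- A->C
    let p2 := xtoyL a c Cc
    let r2 := visitL p2.1 b v
    let v := r2.2
    let q := if !r2.1 then q ++ [(p2.1, b, p2.2)] else q
    -- B->A
    let p3 := xtoyL b a Aa
    let r3 := visitL p3.2 p3.1 v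
    let v := r3.2
    let q := if !r3.1 then q ++ [(p3.2, p3.1, c)] else q
    -- B->C
    let p4 := xtoyL b c Cc
    let r4 := visitL a p4.1 v
    let v := r4.2
    let q := if !r4.1 then q ++ [(a, p4.1, p4.2)] else q
    -- C->A
    let p5 := xtoyL c a Aa
    let r5 := visitL p5.2 b v
    let v := r5.2
    let q := if !r5.1 then q ++ [(p5.2, b, p5.1)] else q
    -- C->B
    let p6 := xtoyL c b Bb
    let r6 := visitL a p6.2 v
    let v := r6.2
    let q := if !r6.1 then q ++ [(a, p6.2, p6.1)] else q
    bfsLoop Aa Bb Cc fuel q v ans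

-- `list(answer)`: answer is a Python set, its iteration order is not modelled (outputs are
-- compared as a set); the port returns the canonical ascending order
def bfs (A : Int) (B : Int) (C : Int) : List Int :=
  (PySem.List.sorted (bfsLoop A B C 40402 [(0, 0, C)] PySem.Set.empty PySem.Set.empty).2
    (fun x => x) false)

-- ===== PORT B =====
-- helper `moves` of B: the six pour results, literal
def movesL (A : Int) (B : Int) (C : Int) (a : Int) (b : Int) (c : Int) : List (Int × Int × Int) :=
  let ab := xtoyL a b B
  let ac := xtoyL a c C
  let ba := xtoyL b a A
  let bc := xtoyL b c C
  let ca := xtoyL c a A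
  let cb := xtoyL c b B
  [(ab.1, ab.2, c), (ac.1, b, ac.2), (ba.2, ba.1, c),
   (a, bc.1, bc.2), (ca.2, b, ca.1), (a, cb.2, cb.1)]

-- B's recursive `dfs` (dfsLoop = one call of dfs, dfsList = its `for` loop over moves);
-- state = (visited-as-set-of-True-cells, answer); fuel only makes the recursion structural
mutual
def dfsLoop (A : Int) (B : Int) (C : Int) :
    Nat → Int × Int × Int → PySem.Set (Int × Int) × PySem.Set Int →
    PySem.Set (Int × Int) × PySem.Set Int
  | 0, _, st => st
  | fuel + 1, s, st =>
    let ans := if s.1 = 0 then PySem.Set.add st.2 s.2.2 else st.2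
    dfsList A B C fuel (movesL A B C s.1 s.2.1 s.2.2) (st.1, ans)
  termination_by fuel _ _ => (fuel, 0)
def dfsList (A : Int) (B : Int) (C : Int) :
    Nat → List (Int × Int × Int) → PySem.Set (Int × Int) × PySem.Set Int →
    PySem.Set (Int × Int) × PySem.Set Int
  | _, [], st => st
  | fuel, m :: rest, st =>
    if seenL st.1 m.1 m.2.1 then dfsList A B C fuel rest st
    else dfsList A B C fuel rest
      (dfsLoop A B C fuel m (PySem.Set.add st.1 (m.1, m.2.1), st.2))
  termination_by fuel ms _ => (fuel, ms.length + 1)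
end

-- `sorted(answer)` of B
def bfs_alt (A : Int) (B : Int) (C : Int) : List Int :=
  (PySem.List.sorted (dfsLoop A B C 40402 (0, 0, C) (PySem.Set.empty, PySem.Set.empty)).2
    (fun x => x) false)

-- ===== PRECONDITION & SPEC =====
-- Pre_bfs excludes inputs with a negative jug size or with (A > 200 and C > 200) or (B > 200 and C > 200):
-- there A's 201×201 visited grid is indexed out of range, so A either raises IndexError or returns a value
-- produced by Python's negative-index wraparound (B raises there too).
def Pre_bfs (A : Int) (B : Int) (C : Int) : Prop :=
  0 ≤ A ∧ 0 ≤ B ∧ 0 ≤ C ∧ (A ≤ 200 ∨ C ≤ 200) ∧ (B ≤ 200 ∨ C ≤ 200)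
instance (A : Int) (B : Int) (C : Int) : Decidable (Pre_bfs A B C) := by
  unfold Pre_bfs; infer_instance
def pvWitness_bfs : Int × Int × Int := (5, 3, 7)
def Spec_bfs (A : Int) (B : Int) (C : Int) (out : List Int) : Prop := out = bfs_alt A B C
instance (A : Int) (B : Int) (C : Int) (out : List Int) : Decidable (Spec_bfs A B C out) := by
  unfold Spec_bfs; infer_instance

-- ===== CLAIM (what is proved, stated in full; the proofs are below) =====
def Claim_equal_bfs : Prop :=
  ∀ (A : Int) (B : Int) (C : Int), Dom_bfs A B C → Pre_bfs A B C → Spec_bfs A B C (bfs A B C)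

-- ===== LEMMAS AND PROOFS =====

-- the grid cell a state occupies
def cellOf (s : Int × Int × Int) : Int × Int := (s.1, s.2.1)

-- well-formed states: amounts within the capacities, total = C
def GoodSt (A : Int) (B : Int) (C : Int) (s : Int × Int × Int) : Prop :=
  0 ≤ s.1 ∧ s.1 ≤ A ∧ 0 ≤ s.2.1 ∧ s.2.1 ≤ B ∧ 0 ≤ s.2.2 ∧ s.2.2 ≤ C ∧
    s.1 + s.2.1 + s.2.2 = C

-- the six successor cells of a cell (a cell determines its state: the total is C)
def succCells (A : Int) (B : Int) (C : Int) (p : Int × Int) : List (Int × Int) :=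
  (movesL A B C p.1 p.2 (C - p.1 - p.2)).map cellOf

-- cells reachable from the start cell (0,0)
def Rch (A : Int) (B : Int) (C : Int) (p : Int × Int) : Prop :=
  Relation.ReflTransGen (fun x y => y ∈ succCells A B C x) (0, 0) p

-- cells reachable in at least one step (exactly the cells both programs mark)
def Reach1 (A : Int) (B : Int) (C : Int) (p : Int × Int) : Prop :=
  ∃ x, Rch A B C x ∧ p ∈ succCells A B C x

-- the common answer-set specification
def AnsSpec (A : Int) (B : Int) (C : Int) (x : Int) : Prop :=
  x = C ∨ ∃ p, Reach1 A B C p ∧ p.1 = 0 ∧ x = C - p.2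

-- cells the 201×201 visited grid indexes without error
def InBox (p : Int × Int) : Prop := 0 ≤ p.1 ∧ p.1 ≤ 200 ∧ 0 ≤ p.2 ∧ p.2 ≤ 200

theorem xtoyL_fst (x y Y : Int) : (xtoyL x y Y).1 = if Y - (x + y) ≥ 0 then 0 else -(Y - (x + y)) := by
  unfold xtoyL; simp; split <;> rfl

theorem xtoyL_snd (x y Y : Int) : (xtoyL x y Y).2 = if Y - (x + y) ≥ 0 then x + y else Y := by
  unfold xtoyL; simp; split <;> rfl

theorem reach1_of_rch_ne (A B C : Int) (p : Int × Int) (hp : Rch A B C p)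
    (hne : p ≠ ((0 : Int), (0 : Int))) : Reach1 A B C p := by
  rcases Relation.ReflTransGen.cases_tail hp with h | ⟨x, hx, hstep⟩
  · exact absurd h hne
  · exact ⟨x, hx, hstep⟩

theorem rch_of_reach1 (A B C : Int) (p : Int × Int) (hp : Reach1 A B C p) : Rch A B C p := by
  obtain ⟨x, hx, hstep⟩ := hp
  exact Relation.ReflTransGen.tail hx hstep

theorem moves_good (A B C : Int) (hA : 0 ≤ A) (hB : 0 ≤ B) (hC : 0 ≤ C)
    (s : Int × Int × Int) (hs : GoodSt A B C s)
    (m : Int × Int × Int) (hm : m ∈ movesL A B C s.1 s.2.1 s.2.2) : GoodSt A B C m := by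
  obtain ⟨a, b, c⟩ := s
  simp only [GoodSt] at hs
  obtain ⟨h1, h2, h3, h4, h5, h6, h7⟩ := hs
  simp only [movesL, List.mem_cons, List.not_mem_nil, or_false] at hm
  rcases hm with h | h | h | h | h | h <;> subst h <;>
    simp only [GoodSt, xtoyL_fst, xtoyL_snd] <;> split_ifs <;> omega

theorem moves_eq_succCells (A B C : Int) (s : Int × Int × Int) (hs : GoodSt A B C s) :
    succCells A B C (cellOf s) = (movesL A B C s.1 s.2.1 s.2.2).map cellOf := by
  obtain ⟨a, b, c⟩ := s
  simp only [GoodSt] at hs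
  have : C - a - b = c := by omega
  simp only [succCells, cellOf]
  rw [this]

theorem rch_good (A B C : Int) (hA : 0 ≤ A) (hB : 0 ≤ B) (hC : 0 ≤ C)
    (p : Int × Int) (hp : Rch A B C p) : GoodSt A B C (p.1, p.2, C - p.1 - p.2) := by
  induction hp with
  | refl =>
    simp only [GoodSt]; omega
  | tail hx hstep ih =>
    rename_i x y
    simp only [succCells, List.mem_map] at hstep
    obtain ⟨m, hm, hcell⟩ := hstep
    have hg := moves_good A B C hA hB hC (x.1, x.2, C - x.1 - x.2) ih m hm
    obtain ⟨g1, g2, g3, g4, g5, g6, g7⟩ := hg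
    rw [← hcell]
    simp only [cellOf, GoodSt]
    exact ⟨g1, g2, g3, g4, by omega, by omega, by omega⟩

theorem reach1_box (A B C : Int) (hpre : Pre_bfs A B C) (p : Int × Int)
    (hp : Reach1 A B C p) : InBox p := by
  obtain ⟨hA, hB, hC, hAC, hBC⟩ := hpre
  have hg := rch_good A B C hA hB hC p (rch_of_reach1 A B C p hp)
  simp only [GoodSt] at hg
  simp only [InBox]
  omega

theorem box_card (v : List (Int × Int)) (hnd : v.Nodup) (hbox : ∀ p ∈ v, InBox p) :
    v.length ≤ 40401 := by
  have h1 : v.toFinset.card = v.length := List.toFinset_card_of_nodup hnd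
  have h2 : v.toFinset ⊆ (Finset.Icc (0 : Int) 200) ×ˢ (Finset.Icc (0 : Int) 200) := by
    intro p hp
    have hb := hbox p (List.mem_toFinset.mp hp)
    simp only [InBox] at hb
    simp only [Finset.mem_product, Finset.mem_Icc]
    exact ⟨⟨hb.1, hb.2.1⟩, hb.2.2.1, hb.2.2.2⟩
  have h3 := Finset.card_le_card h2
  rw [h1, Finset.card_product] at h3
  simpa [Int.card_Icc] using h3

theorem nodup_subset_length {α : Type} [DecidableEq α] (v w : List α) (hnd : v.Nodup)
    (hsub : ∀ x ∈ v, x ∈ w) : v.length ≤ w.length := by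
  have h1 : v.toFinset.card = v.length := List.toFinset_card_of_nodup hnd
  have h2 : v.toFinset ⊆ w.toFinset := by
    intro x hx
    exact List.mem_toFinset.mpr (hsub x (List.mem_toFinset.mp hx))
  calc v.length = v.toFinset.card := h1.symm
    _ ≤ w.toFinset.card := Finset.card_le_card h2
    _ ≤ w.length := w.toFinset_card_le

theorem closed_rch (A B C : Int) (V : List (Int × Int))
    (hcl : ∀ p, (p = ((0 : Int), (0 : Int)) ∨ p ∈ V) → ∀ y ∈ succCells A B C p, y ∈ V)
    (p : Int × Int) (hp : Rch A B C p) : p = ((0 : Int), (0 : Int)) ∨ p ∈ V := by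
  induction hp with
  | refl => exact Or.inl rfl
  | tail hx hstep ih => exact Or.inr (hcl _ ih _ hstep)

theorem ansSpec_of_state (A B C : Int) (s : Int × Int × Int) (hg : GoodSt A B C s)
    (hr : Rch A B C (cellOf s)) (h0 : s.1 = 0) : AnsSpec A B C s.2.2 := by
  obtain ⟨g1, g2, g3, g4, g5, g6, g7⟩ := hg
  by_cases hz : cellOf s = ((0 : Int), (0 : Int))
  · left
    have h1 : s.1 = 0 := h0
    have h2 : s.2.1 = 0 := congrArg Prod.snd hz
    omega
  · right
    refine ⟨cellOf s, reach1_of_rch_ne A B C _ hr hz, h0, ?_⟩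
    simp only [cellOf]
    omega

theorem goodst_box (A B C : Int) (hpre : Pre_bfs A B C) (s : Int × Int × Int)
    (hg : GoodSt A B C s) : 0 ≤ s.1 ∧ s.1 ≤ 200 ∧ 0 ≤ s.2.1 ∧ s.2.1 ≤ 200 := by
  obtain ⟨hA, hB, hC, hAC, hBC⟩ := hpre
  obtain ⟨g1, g2, g3, g4, g5, g6, g7⟩ := hg
  omega

-- ---- BFS side ----

-- one visit/append block of A's loop body, as a fold step
def relax (st : List (Int × Int × Int) × PySem.Set (Int × Int)) (m : Int × Int × Int) :
    List (Int × Int × Int) × PySem.Set (Int × Int) :=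
  let r := visitL m.1 m.2.1 st.2
  (if !r.1 then st.1 ++ [m] else st.1, r.2)

theorem bfsLoop_succ_eq (Aa Bb Cc : Int) (fuel : Nat) (a b c : Int)
    (q : List (Int × Int × Int)) (v : PySem.Set (Int × Int)) (ans : PySem.Set Int) :
    bfsLoop Aa Bb Cc (fuel + 1) ((a, b, c) :: q) v ans =
      bfsLoop Aa Bb Cc fuel
        ((movesL Aa Bb Cc a b c).foldl relax (q, v)).1
        ((movesL Aa Bb Cc a b c).foldl relax (q, v)).2
        (if a = 0 then PySem.Set.add ans c else ans) := by
  simp only [bfsLoop, movesL, relax, List.foldl_cons, List.foldl_nil]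

theorem seenL_true (v : PySem.Set (Int × Int)) (a b : Int)
    (h : (a, b) ∈ v ∨ ¬ (0 ≤ a ∧ a ≤ 200 ∧ 0 ≤ b ∧ b ≤ 200)) : seenL v a b = true := by
  rcases h with h | h <;> simp [seenL, h]

theorem seenL_false (v : PySem.Set (Int × Int)) (a b : Int)
    (hbox : 0 ≤ a ∧ a ≤ 200 ∧ 0 ≤ b ∧ b ≤ 200) (h : (a, b) ∉ v) : seenL v a b = false := by
  simp [seenL, hbox, h]

theorem relax_of_mem (st : List (Int × Int × Int) × PySem.Set (Int × Int))
    (m : Int × Int × Int)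
    (h : (m.1, m.2.1) ∈ st.2 ∨ ¬ (0 ≤ m.1 ∧ m.1 ≤ 200 ∧ 0 ≤ m.2.1 ∧ m.2.1 ≤ 200)) :
    relax st m = st := by
  simp [relax, visitL, seenL_true st.2 m.1 m.2.1 h]

theorem relax_of_not_mem (st : List (Int × Int × Int) × PySem.Set (Int × Int))
    (m : Int × Int × Int) (hbox : 0 ≤ m.1 ∧ m.1 ≤ 200 ∧ 0 ≤ m.2.1 ∧ m.2.1 ≤ 200)
    (h : (m.1, m.2.1) ∉ st.2) :
    relax st m = (st.1 ++ [m], PySem.Set.add st.2 (m.1, m.2.1)) := by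
  simp [relax, visitL, seenL_false st.2 m.1 m.2.1 hbox h]

theorem foldl_relax_props (ms : List (Int × Int × Int)) (q : List (Int × Int × Int))
    (v : PySem.Set (Int × Int)) (hnd : v.Nodup)
    (hboxes : ∀ m ∈ ms, 0 ≤ m.1 ∧ m.1 ≤ 200 ∧ 0 ≤ m.2.1 ∧ m.2.1 ≤ 200) :
    (((ms.foldl relax (q, v)).2).Nodup) ∧
    (∀ p ∈ v, p ∈ (ms.foldl relax (q, v)).2) ∧
    (∀ p ∈ (ms.foldl relax (q, v)).2, p ∈ v ∨ ∃ m ∈ ms, p = cellOf m) ∧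
    (∀ m ∈ ms, cellOf m ∈ (ms.foldl relax (q, v)).2) ∧
    (∀ s ∈ (ms.foldl relax (q, v)).1, s ∈ q ∨ s ∈ ms) ∧
    (∀ s ∈ q, s ∈ (ms.foldl relax (q, v)).1) ∧
    (∀ m ∈ ms, cellOf m ∈ v ∨ ∃ s ∈ (ms.foldl relax (q, v)).1, cellOf s = cellOf m) ∧
    ((ms.foldl relax (q, v)).1.length + v.length
        = q.length + (ms.foldl relax (q, v)).2.length) := by
  induction ms generalizing q v with
  | nil =>
    simp only [List.foldl_nil]
    exact ⟨hnd, fun p hp => hp, fun p hp => Or.inl hp, fun m hm => by simp at hm,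
      fun s hs => Or.inl hs, fun s hs => hs, fun m hm => by simp at hm, trivial⟩
  | cons m ms ih =>
    have hbox := hboxes m List.mem_cons_self
    have hboxes' := fun m' h => hboxes m' (List.mem_cons_of_mem _ h)
    by_cases hmem : (m.1, m.2.1) ∈ v
    · rw [List.foldl_cons, relax_of_mem _ _ (Or.inl hmem)]
      obtain ⟨i1, i2, i3, i4, i5, i6, i7, i8⟩ := ih q v hnd hboxes'
      refine ⟨i1, i2, ?_, ?_, ?_, i6, ?_, i8⟩
      · intro p hp
        rcases i3 p hp with h | ⟨m', hm', he⟩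
        · exact Or.inl h
        · exact Or.inr ⟨m', List.mem_cons_of_mem _ hm', he⟩
      · intro m' hm'
        rcases List.mem_cons.mp hm' with h | h
        · subst h; exact i2 _ hmem
        · exact i4 _ h
      · intro s hs
        rcases i5 s hs with h | h
        · exact Or.inl h
        · exact Or.inr (List.mem_cons_of_mem _ h)
      · intro m' hm'
        rcases List.mem_cons.mp hm' with h | h
        · subst h; exact Or.inl hmem
        · exact i7 _ h
    · rw [List.foldl_cons, relax_of_not_mem _ _ hbox hmem]
      have hnd' : (PySem.Set.add v (m.1, m.2.1)).Nodup := PySem.Set.nodup_add _ _ hnd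
      obtain ⟨i1, i2, i3, i4, i5, i6, i7, i8⟩ :=
        ih (q ++ [m]) (PySem.Set.add v (m.1, m.2.1)) hnd' hboxes'
      have hmq : m ∈ (ms.foldl relax (q ++ [m], PySem.Set.add v (m.1, m.2.1))).1 :=
        i6 m (List.mem_append.mpr (Or.inr (List.mem_singleton.mpr rfl)))
      refine ⟨i1, ?_, ?_, ?_, ?_, ?_, ?_, ?_⟩
      · exact fun p hp => i2 p ((PySem.Set.mem_add _ _ _).mpr (Or.inl hp))
      · intro p hp
        rcases i3 p hp with h | ⟨m', hm', he⟩
        · rcases (PySem.Set.mem_add _ _ _).mp h with h' | h'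
          · exact Or.inl h'
          · exact Or.inr ⟨m, List.mem_cons_self, h'⟩
        · exact Or.inr ⟨m', List.mem_cons_of_mem _ hm', he⟩
      · intro m' hm'
        rcases List.mem_cons.mp hm' with h | h
        · subst h; exact i2 _ ((PySem.Set.mem_add _ _ _).mpr (Or.inr rfl))
        · exact i4 _ h
      · intro s hs
        rcases i5 s hs with h | h
        · rcases List.mem_append.mp h with h' | h'
          · exact Or.inl h'
          · exact Or.inr (List.mem_cons.mpr (Or.inl (List.mem_singleton.mp h')))
        · exact Or.inr (List.mem_cons_of_mem _ h)
      · exact fun s hs => i6 s (List.mem_append.mpr (Or.inl hs))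
      · intro m' hm'
        rcases List.mem_cons.mp hm' with h | h
        · exact Or.inr ⟨m, hmq, by rw [h]⟩
        · rcases i7 _ h with h' | h'
          · rcases (PySem.Set.mem_add _ _ _).mp h' with h'' | h''
            · exact Or.inl h''
            · exact Or.inr ⟨m, hmq, by rw [h'']; rfl⟩
          · exact Or.inr h'
      · have hlen : (PySem.Set.add v (m.1, m.2.1)).length = v.length + 1 := by
          rw [PySem.Set.add_of_not_mem hmem]; simp
        simp only [List.length_append, List.length_cons, List.length_nil] at i8 ⊢
        omega

def BfsInv (A B C : Int) (fuel : Nat) (q : List (Int × Int × Int))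
    (v : PySem.Set (Int × Int)) (ans : PySem.Set Int) : Prop :=
  (∀ s ∈ q, GoodSt A B C s ∧ Rch A B C (cellOf s)) ∧
  (∀ p ∈ v, Reach1 A B C p) ∧
  v.Nodup ∧ ans.Nodup ∧
  (∀ p, (p = ((0 : Int), (0 : Int)) ∨ p ∈ v) →
      (∃ s ∈ q, cellOf s = p) ∨ (∀ y ∈ succCells A B C p, y ∈ v)) ∧
  (q.length + (40401 - v.length) ≤ fuel) ∧
  (∀ x ∈ ans, AnsSpec A B C x) ∧
  (∀ p ∈ v, p.1 = 0 → (∃ s ∈ q, cellOf s = p) ∨ (C - p.2) ∈ ans) ∧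
  (C ∈ ans ∨ ∃ s ∈ q, s = ((0 : Int), (0 : Int), C))

theorem bfs_final (A B C : Int) (hpre : Pre_bfs A B C) (fuel : Nat)
    (v : PySem.Set (Int × Int)) (ans : PySem.Set Int)
    (hinv : BfsInv A B C fuel [] v ans) :
    ans.Nodup ∧ (∀ x, x ∈ ans ↔ AnsSpec A B C x) := by
  obtain ⟨-, hv, -, hansnd, hJ4, -, hJ6, hJ7, hJ8⟩ := hinv
  have hcl : ∀ p, (p = ((0 : Int), (0 : Int)) ∨ p ∈ v) → ∀ y ∈ succCells A B C p, y ∈ v := by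
    intro p hp
    rcases hJ4 p hp with ⟨s, hs, -⟩ | h
    · simp at hs
    · exact h
  refine ⟨hansnd, fun x => ⟨hJ6 x, ?_⟩⟩
  intro hx
  rcases hx with rfl | ⟨p, hp1, hp0, rfl⟩
  · rcases hJ8 with h | ⟨s, hs, -⟩
    · exact h
    · simp at hs
  · have hpv : p ∈ v := by
      obtain ⟨x0, hx0, hstep⟩ := hp1
      rcases closed_rch A B C v hcl x0 hx0 with rfl | hx0v
      · exact hcl _ (Or.inl rfl) _ hstep
      · exact hcl _ (Or.inr hx0v) _ hstep
    rcases hJ7 p hpv hp0 with ⟨s, hs, -⟩ | h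
    · simp at hs
    · exact h

theorem bfs_master (A B C : Int) (hpre : Pre_bfs A B C) :
    ∀ (fuel : Nat) (q : List (Int × Int × Int)) (v : PySem.Set (Int × Int))
      (ans : PySem.Set Int), BfsInv A B C fuel q v ans →
      ((bfsLoop A B C fuel q v ans).2.Nodup ∧
        (∀ x, x ∈ (bfsLoop A B C fuel q v ans).2 ↔ AnsSpec A B C x)) := by
  intro fuel
  induction fuel with
  | zero =>
    intro q v ans hinv
    have hq : q = [] := by
      have h5 := hinv.2.2.2.2.2.1
      cases q with
      | nil => rfl
      | cons s q => simp at h5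
    subst hq
    simpa only [bfsLoop] using bfs_final A B C hpre 0 v ans hinv
  | succ fuel ih =>
    intro q v ans hinv
    cases q with
    | nil =>
      simpa only [bfsLoop] using bfs_final A B C hpre (fuel + 1) v ans hinv
    | cons s q =>
      obtain ⟨a, b, c⟩ := s
      rw [bfsLoop_succ_eq]
      obtain ⟨hJ1, hJ2, hndv, hnda, hJ4, hJ5, hJ6, hJ7, hJ8⟩ := hinv
      obtain ⟨hgood, hrch⟩ := hJ1 _ List.mem_cons_self
      have hmgood : ∀ m ∈ movesL A B C a b c, GoodSt A B C m := fun m hm =>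
        moves_good A B C hpre.1 hpre.2.1 hpre.2.2.1 (a, b, c) hgood m hm
      obtain ⟨p1, p2, p3, p4, p5, p6, p7, p8⟩ :=
        foldl_relax_props (movesL A B C a b c) q v hndv
          (fun m hm => goodst_box A B C hpre m (hmgood m hm))
      have hsucc : succCells A B C ((a : Int), (b : Int))
          = (movesL A B C a b c).map cellOf := moves_eq_succCells A B C (a, b, c) hgood
      have hreach1 : ∀ m ∈ movesL A B C a b c, Reach1 A B C (cellOf m) := by
        intro m hm
        exact ⟨(a, b), hrch, by rw [hsucc]; exact List.mem_map_of_mem hm⟩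
      have hJ2' : ∀ p ∈ ((movesL A B C a b c).foldl relax (q, v)).2, Reach1 A B C p := by
        intro p hp
        rcases p3 p hp with h | ⟨m, hm, rfl⟩
        · exact hJ2 p h
        · exact hreach1 m hm
      have hansmono : ∀ x ∈ ans, x ∈ (if a = 0 then PySem.Set.add ans c else ans) := by
        intro x hx
        split
        · exact (PySem.Set.mem_add _ _ _).mpr (Or.inl hx)
        · exact hx
      have hOld : ∀ p, ¬ p = ((a : Int), (b : Int)) → (p = ((0 : Int), (0 : Int)) ∨ p ∈ v) →
          (∃ s ∈ ((movesL A B C a b c).foldl relax (q, v)).1, cellOf s = p) ∨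
            (∀ y ∈ succCells A B C p, y ∈ ((movesL A B C a b c).foldl relax (q, v)).2) := by
        intro p hne hp
        rcases hJ4 p hp with ⟨s, hs, hcs⟩ | hclosed
        · rcases List.mem_cons.mp hs with rfl | hs'
          · exact absurd hcs.symm hne
          · exact Or.inl ⟨s, p6 s hs', hcs⟩
        · exact Or.inr (fun y hy => p2 y (hclosed y hy))
      have hOld7 : ∀ p, p ∈ v → p.1 = 0 →
          (∃ s ∈ ((movesL A B C a b c).foldl relax (q, v)).1, cellOf s = p) ∨
            (C - p.2) ∈ (if a = 0 then PySem.Set.add ans c else ans) := by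
        intro p hpv hp0
        rcases hJ7 p hpv hp0 with ⟨s, hs, hcs⟩ | hin
        · rcases List.mem_cons.mp hs with rfl | hs'
          · have hb : p.2 = b := by rw [← hcs]; rfl
            have ha : p.1 = a := by rw [← hcs]; rfl
            have hsum : a + b + c = C := hgood.2.2.2.2.2.2
            have h0 : a = 0 := by omega
            have hc : C - p.2 = c := by omega
            right
            rw [hc, if_pos h0]
            exact (PySem.Set.mem_add _ _ _).mpr (Or.inr rfl)
          · exact Or.inl ⟨s, p6 s hs', hcs⟩
        · exact Or.inr (hansmono _ hin)
      apply ih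
      refine ⟨?_, hJ2', p1, ?_, ?_, ?_, ?_, ?_, ?_⟩
      · intro s hs
        rcases p5 s hs with h | h
        · exact hJ1 s (List.mem_cons_of_mem _ h)
        · exact ⟨hmgood s h, rch_of_reach1 A B C _ (hreach1 s h)⟩
      · split
        · exact PySem.Set.nodup_add _ _ hnda
        · exact hnda
      · intro p hp
        by_cases hpc : p = ((a : Int), (b : Int))
        · subst hpc
          right
          intro y hy
          rw [hsucc] at hy
          obtain ⟨m, hm, rfl⟩ := List.mem_map.mp hy
          exact p4 m hm
        · rcases hp with rfl | hpv
          · exact hOld _ hpc (Or.inl rfl)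
          · rcases p3 p hpv with hold | ⟨m, hm, rfl⟩
            · exact hOld _ hpc (Or.inr hold)
            · rcases p7 m hm with hv | ⟨s, hs, hcs⟩
              · exact hOld _ hpc (Or.inr hv)
              · exact Or.inl ⟨s, hs, hcs⟩
      · have hVlen : ((movesL A B C a b c).foldl relax (q, v)).2.length ≤ 40401 :=
          box_card _ p1 (fun p hp => reach1_box A B C hpre p (hJ2' p hp))
        have hvlen : v.length ≤ ((movesL A B C a b c).foldl relax (q, v)).2.length :=
          nodup_subset_length v _ hndv p2
        simp only [List.length_cons] at hJ5
        omega
      · intro x hx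
        by_cases h0 : a = 0
        · rw [if_pos h0] at hx
          rcases (PySem.Set.mem_add _ _ _).mp hx with h | heq
          · exact hJ6 x h
          · rw [heq]; exact ansSpec_of_state A B C (a, b, c) hgood hrch h0
        · rw [if_neg h0] at hx
          exact hJ6 x hx
      · intro p hp hp0
        rcases p3 p hp with hold | ⟨m, hm, rfl⟩
        · exact hOld7 p hold hp0
        · rcases p7 m hm with hv | ⟨s, hs, hcs⟩
          · exact hOld7 _ hv hp0
          · exact Or.inl ⟨s, hs, hcs⟩
      · rcases hJ8 with hC | ⟨s, hs, hseq⟩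
        · exact Or.inl (hansmono _ hC)
        · rcases List.mem_cons.mp hs with h | h
          · rw [h] at hseq
            have ha : a = 0 := congrArg Prod.fst hseq
            have hc : c = C := congrArg (fun t => t.2.2) hseq
            left
            rw [if_pos ha]
            exact (PySem.Set.mem_add _ _ _).mpr (Or.inr hc.symm)
          · exact Or.inr ⟨s, p6 s h, hseq⟩

-- ---- DFS side ----

def LdfsP (A B C : Int) (fuel : Nat) : Prop :=
  ∀ (s : Int × Int × Int) (v : PySem.Set (Int × Int)) (ans : PySem.Set Int),
    GoodSt A B C s → Rch A B C (cellOf s) → v.Nodup → ans.Nodup →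
    (∀ p ∈ v, Reach1 A B C p) → (∀ x ∈ ans, AnsSpec A B C x) →
    (40402 - v.length ≤ fuel) →
    ((dfsLoop A B C fuel s (v, ans)).1.Nodup ∧
     (dfsLoop A B C fuel s (v, ans)).2.Nodup ∧
     (∀ p ∈ v, p ∈ (dfsLoop A B C fuel s (v, ans)).1) ∧
     (∀ x ∈ ans, x ∈ (dfsLoop A B C fuel s (v, ans)).2) ∧
     (∀ p ∈ (dfsLoop A B C fuel s (v, ans)).1, Reach1 A B C p) ∧
     (∀ x ∈ (dfsLoop A B C fuel s (v, ans)).2, AnsSpec A B C x) ∧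
     (∀ y ∈ succCells A B C (cellOf s), y ∈ (dfsLoop A B C fuel s (v, ans)).1) ∧
     (∀ p ∈ (dfsLoop A B C fuel s (v, ans)).1,
        p ∈ v ∨ ∀ y ∈ succCells A B C p, y ∈ (dfsLoop A B C fuel s (v, ans)).1) ∧
     (s.1 = 0 → s.2.2 ∈ (dfsLoop A B C fuel s (v, ans)).2) ∧
     (∀ p ∈ (dfsLoop A B C fuel s (v, ans)).1,
        p ∉ v → p.1 = 0 → (C - p.2) ∈ (dfsLoop A B C fuel s (v, ans)).2) ∧
     v.length ≤ (dfsLoop A B C fuel s (v, ans)).1.length)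

def MlistP (A B C : Int) (fuel : Nat) : Prop :=
  ∀ (ms : List (Int × Int × Int)) (v : PySem.Set (Int × Int)) (ans : PySem.Set Int),
    (∀ m ∈ ms, GoodSt A B C m ∧ Reach1 A B C (cellOf m)) → v.Nodup → ans.Nodup →
    (∀ p ∈ v, Reach1 A B C p) → (∀ x ∈ ans, AnsSpec A B C x) →
    (40402 - v.length ≤ fuel + 1) →
    ((dfsList A B C fuel ms (v, ans)).1.Nodup ∧
     (dfsList A B C fuel ms (v, ans)).2.Nodup ∧
     (∀ p ∈ v, p ∈ (dfsList A B C fuel ms (v, ans)).1) ∧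
     (∀ x ∈ ans, x ∈ (dfsList A B C fuel ms (v, ans)).2) ∧
     (∀ p ∈ (dfsList A B C fuel ms (v, ans)).1, Reach1 A B C p) ∧
     (∀ x ∈ (dfsList A B C fuel ms (v, ans)).2, AnsSpec A B C x) ∧
     (∀ m ∈ ms, cellOf m ∈ (dfsList A B C fuel ms (v, ans)).1) ∧
     (∀ p ∈ (dfsList A B C fuel ms (v, ans)).1,
        p ∈ v ∨ ∀ y ∈ succCells A B C p, y ∈ (dfsList A B C fuel ms (v, ans)).1) ∧
     (∀ p ∈ (dfsList A B C fuel ms (v, ans)).1,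
        p ∉ v → p.1 = 0 → (C - p.2) ∈ (dfsList A B C fuel ms (v, ans)).2) ∧
     v.length ≤ (dfsList A B C fuel ms (v, ans)).1.length)

theorem dfsList_cons (A B C : Int) (fuel : Nat) (m : Int × Int × Int)
    (rest : List (Int × Int × Int)) (v : PySem.Set (Int × Int)) (ans : PySem.Set Int)
    (hbox : 0 ≤ m.1 ∧ m.1 ≤ 200 ∧ 0 ≤ m.2.1 ∧ m.2.1 ≤ 200) :
    dfsList A B C fuel (m :: rest) (v, ans) =
      if (m.1, m.2.1) ∈ v then dfsList A B C fuel rest (v, ans)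
      else dfsList A B C fuel rest
        (dfsLoop A B C fuel m (PySem.Set.add v (m.1, m.2.1), ans)) := by
  by_cases h : (m.1, m.2.1) ∈ v
  · rw [if_pos h]
    simp only [dfsList]
    rw [if_pos (seenL_true v m.1 m.2.1 (Or.inl h))]
  · rw [if_neg h]
    simp only [dfsList]
    rw [if_neg (by rw [seenL_false v m.1 m.2.1 hbox h]; exact Bool.false_ne_true)]

theorem dfsLoop_succ (A B C : Int) (fuel : Nat) (s : Int × Int × Int)
    (v : PySem.Set (Int × Int)) (ans : PySem.Set Int) :
    dfsLoop A B C (fuel + 1) s (v, ans) =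
      dfsList A B C fuel (movesL A B C s.1 s.2.1 s.2.2)
        (v, if s.1 = 0 then PySem.Set.add ans s.2.2 else ans) := by
  simp only [dfsLoop]

theorem dfs_zero (A B C : Int) (hpre : Pre_bfs A B C) : LdfsP A B C 0 := by
  intro s v ans hg hr hvnd hand hvr har hfuel
  have hcard : v.length ≤ 40401 :=
    box_card v hvnd (fun p hp => reach1_box A B C hpre p (hvr p hp))
  exact absurd hfuel (by omega)

theorem dfs_list_step (A B C : Int) (hpre : Pre_bfs A B C) (fuel : Nat)
    (hL : LdfsP A B C fuel) : MlistP A B C fuel := by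
  intro ms
  induction ms with
  | nil =>
    intro v ans hms hvnd hand hvr har hfuel
    simp only [dfsList]
    exact ⟨hvnd, hand, fun p hp => hp, fun x hx => hx, hvr, har, fun m hm => by simp at hm,
      fun p hp => Or.inl hp, fun p hp hnp _ => absurd hp hnp, le_refl _⟩
  | cons m rest ihm =>
    intro v ans hms hvnd hand hvr har hfuel
    have hmgood := (hms m List.mem_cons_self).1
    have hmreach := (hms m List.mem_cons_self).2
    have hrest := fun m' h => hms m' (List.mem_cons_of_mem _ h)
    rw [dfsList_cons A B C fuel m rest v ans (goodst_box A B C hpre m hmgood)]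
    by_cases hmem : (m.1, m.2.1) ∈ v
    · rw [if_pos hmem]
      obtain ⟨r1, r2, r3, r4, r5, r6, r7, r8, r9, r10⟩ :=
        ihm v ans hrest hvnd hand hvr har hfuel
      refine ⟨r1, r2, r3, r4, r5, r6, ?_, r8, r9, r10⟩
      intro m' hm'
      rcases List.mem_cons.mp hm' with h | h
      · exact r3 _ (h ▸ hmem)
      · exact r7 _ h
    · rw [if_neg hmem]
      have hlen : (PySem.Set.add v (m.1, m.2.1)).length = v.length + 1 := by
        rw [PySem.Set.add_of_not_mem hmem]; simp
      have hvr' : ∀ p ∈ PySem.Set.add v (m.1, m.2.1), Reach1 A B C p := by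
        intro p hp
        rcases (PySem.Set.mem_add _ _ _).mp hp with h | rfl
        · exact hvr p h
        · exact hmreach
      obtain ⟨l1, l2, l3, l4, l5, l6, l7, l8, l9, l10, l11⟩ :=
        hL m (PySem.Set.add v (m.1, m.2.1)) ans hmgood
          (rch_of_reach1 A B C _ hmreach) (PySem.Set.nodup_add _ _ hvnd) hand
          hvr' har (by omega)
      obtain ⟨r1, r2, r3, r4, r5, r6, r7, r8, r9, r10⟩ :=
        ihm (dfsLoop A B C fuel m (PySem.Set.add v (m.1, m.2.1), ans)).1
          (dfsLoop A B C fuel m (PySem.Set.add v (m.1, m.2.1), ans)).2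
          hrest l1 l2 l5 l6 (by omega)
      simp only [Prod.mk.eta] at r1 r2 r3 r4 r5 r6 r7 r8 r9 r10
      refine ⟨r1, r2, ?_, ?_, r5, r6, ?_, ?_, ?_, by omega⟩
      · exact fun p hp => r3 p (l3 p ((PySem.Set.mem_add _ _ _).mpr (Or.inl hp)))
      · exact fun x hx => r4 x (l4 x hx)
      · intro m' hm'
        rcases List.mem_cons.mp hm' with h | h
        · exact r3 _ (l3 _ ((PySem.Set.mem_add _ _ _).mpr (Or.inr (by rw [h]; rfl))))
        · exact r7 _ h
      · intro p hp
        rcases r8 p hp with hpc | hclosed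
        · rcases l8 p hpc with hpa | hcl2
          · rcases (PySem.Set.mem_add _ _ _).mp hpa with h | rfl
            · exact Or.inl h
            · exact Or.inr (fun y hy => r3 y (l7 y hy))
          · exact Or.inr (fun y hy => r3 y (hcl2 y hy))
        · exact Or.inr hclosed
      · intro p hp hnp hp0
        by_cases hpc : p ∈ (dfsLoop A B C fuel m (PySem.Set.add v (m.1, m.2.1), ans)).1
        · by_cases hpa : p ∈ PySem.Set.add v (m.1, m.2.1)
          · rcases (PySem.Set.mem_add _ _ _).mp hpa with h | rfl
            · exact absurd h hnp
            · have hsum : m.1 + m.2.1 + m.2.2 = C := hmgood.2.2.2.2.2.2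
              have h0 : m.1 = 0 := hp0
              have : C - (m.1, m.2.1).2 = m.2.2 := by simp; omega
              rw [this]
              exact r4 _ (l9 h0)
          · exact r4 _ (l10 p hpc hpa hp0)
        · exact r9 p hp hpc hp0

theorem dfs_loop_step (A B C : Int) (hpre : Pre_bfs A B C) (fuel : Nat)
    (hM : MlistP A B C fuel) : LdfsP A B C (fuel + 1) := by
  intro s v ans hg hr hvnd hand hvr har hfuel
  rw [dfsLoop_succ]
  have hsucc : succCells A B C (cellOf s) = (movesL A B C s.1 s.2.1 s.2.2).map cellOf :=
    moves_eq_succCells A B C s hg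
  have hms : ∀ m ∈ movesL A B C s.1 s.2.1 s.2.2, GoodSt A B C m ∧ Reach1 A B C (cellOf m) := by
    intro m hm
    exact ⟨moves_good A B C hpre.1 hpre.2.1 hpre.2.2.1 s hg m hm,
      ⟨cellOf s, hr, by rw [hsucc]; exact List.mem_map_of_mem hm⟩⟩
  have hand' : (if s.1 = 0 then PySem.Set.add ans s.2.2 else ans).Nodup := by
    split
    · exact PySem.Set.nodup_add _ _ hand
    · exact hand
  have har' : ∀ x ∈ (if s.1 = 0 then PySem.Set.add ans s.2.2 else ans), AnsSpec A B C x := by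
    intro x hx
    by_cases h0 : s.1 = 0
    · rw [if_pos h0] at hx
      rcases (PySem.Set.mem_add _ _ _).mp hx with h | heq
      · exact har x h
      · rw [heq]; exact ansSpec_of_state A B C s hg hr h0
    · rw [if_neg h0] at hx
      exact har x hx
  have hansmono : ∀ x ∈ ans, x ∈ (if s.1 = 0 then PySem.Set.add ans s.2.2 else ans) := by
    intro x hx
    split
    · exact (PySem.Set.mem_add _ _ _).mpr (Or.inl hx)
    · exact hx
  obtain ⟨m1, m2, m3, m4, m5, m6, m7, m8, m9, m10⟩ :=
    hM (movesL A B C s.1 s.2.1 s.2.2) v (if s.1 = 0 then PySem.Set.add ans s.2.2 else ans)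
      hms hvnd hand' hvr har' hfuel
  refine ⟨m1, m2, m3, fun x hx => m4 x (hansmono x hx), m5, m6, ?_, m8, ?_, m9, m10⟩
  · intro y hy
    rw [hsucc] at hy
    obtain ⟨m, hm, rfl⟩ := List.mem_map.mp hy
    exact m7 m hm
  · intro h0
    exact m4 _ (by rw [if_pos h0]; exact (PySem.Set.mem_add _ _ _).mpr (Or.inr rfl))

theorem dfs_master (A B C : Int) (hpre : Pre_bfs A B C) (fuel : Nat) : LdfsP A B C fuel := by
  induction fuel with
  | zero => exact dfs_zero A B C hpre
  | succ fuel ih => exact dfs_loop_step A B C hpre fuel (dfs_list_step A B C hpre fuel ih)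

-- ===== VERDICT (by name: the statement is the Claim_ definition above) =====
theorem seed_good (A B C : Int) (hpre : Pre_bfs A B C) :
    GoodSt A B C ((0 : Int), (0 : Int), C) := by
  obtain ⟨hA, hB, hC, -, -⟩ := hpre
  simp only [GoodSt]
  omega

theorem bfs_spec : Claim_equal_bfs := by
  intro A B C hdom hpre
  unfold Spec_bfs bfs bfs_alt
  -- BFS side
  have hinv0 : BfsInv A B C 40402 [((0 : Int), (0 : Int), C)] PySem.Set.empty PySem.Set.empty := by
    refine ⟨?_, ?_, ?_, ?_, ?_, ?_, ?_, ?_, ?_⟩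
    · intro s hs
      rcases List.mem_cons.mp hs with rfl | h
      · exact ⟨seed_good A B C hpre, Relation.ReflTransGen.refl⟩
      · simp at h
    · intro p hp; simp [PySem.Set.empty] at hp
    · exact List.nodup_nil
    · exact List.nodup_nil
    · intro p hp
      rcases hp with rfl | hp
      · exact Or.inl ⟨((0 : Int), (0 : Int), C), List.mem_cons_self, rfl⟩
      · simp [PySem.Set.empty] at hp
    · simp [PySem.Set.empty]
    · intro x hx; simp [PySem.Set.empty] at hx
    · intro p hp; simp [PySem.Set.empty] at hp
    · exact Or.inr ⟨((0 : Int), (0 : Int), C), List.mem_cons_self, rfl⟩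
  obtain ⟨hAnd, hAmem⟩ :=
    bfs_master A B C hpre 40402 [((0 : Int), (0 : Int), C)] PySem.Set.empty PySem.Set.empty hinv0
  -- DFS side
  obtain ⟨d1, d2, d3, d4, d5, d6, d7, d8, d9, d10, d11⟩ :=
    dfs_master A B C hpre 40402 ((0 : Int), (0 : Int), C) PySem.Set.empty PySem.Set.empty
      (seed_good A B C hpre) Relation.ReflTransGen.refl List.nodup_nil List.nodup_nil
      (by intro p hp; simp [PySem.Set.empty] at hp)
      (by intro x hx; simp [PySem.Set.empty] at hx)
      (by simp [PySem.Set.empty])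
  have hclB : ∀ p, (p = ((0 : Int), (0 : Int)) ∨
      p ∈ (dfsLoop A B C 40402 ((0 : Int), (0 : Int), C) (PySem.Set.empty, PySem.Set.empty)).1) →
      ∀ y ∈ succCells A B C p,
        y ∈ (dfsLoop A B C 40402 ((0 : Int), (0 : Int), C) (PySem.Set.empty, PySem.Set.empty)).1 := by
    intro p hp
    rcases hp with rfl | hp
    · exact d7
    · rcases d8 p hp with hin | hcl
      · simp [PySem.Set.empty] at hin
      · exact hcl
  have hBmem : ∀ x,
      x ∈ (dfsLoop A B C 40402 ((0 : Int), (0 : Int), C) (PySem.Set.empty, PySem.Set.empty)).2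
        ↔ AnsSpec A B C x := by
    intro x
    refine ⟨d6 x, ?_⟩
    intro hx
    rcases hx with rfl | ⟨p, hp1, hp0, rfl⟩
    · exact d9 rfl
    · have hpv : p ∈ (dfsLoop A B C 40402 ((0 : Int), (0 : Int), C)
          (PySem.Set.empty, PySem.Set.empty)).1 := by
        obtain ⟨x0, hx0, hstep⟩ := hp1
        rcases closed_rch A B C _ hclB x0 hx0 with rfl | hx0v
        · exact hclB _ (Or.inl rfl) _ hstep
        · exact hclB _ (Or.inr hx0v) _ hstep
      exact d10 p hpv (by simp [PySem.Set.empty]) hp0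
  have hperm : ((bfsLoop A B C 40402 [((0 : Int), (0 : Int), C)]
        PySem.Set.empty PySem.Set.empty).2).Perm
      ((dfsLoop A B C 40402 ((0 : Int), (0 : Int), C) (PySem.Set.empty, PySem.Set.empty)).2) := by
    rw [List.perm_ext_iff_of_nodup hAnd d2]
    intro x
    rw [hAmem x, hBmem x]
  exact (PySem.List.sorted_id_eq_sorted_id_iff_perm _ _).mpr hperm
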